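-- pv_equiv track=rewrite | github.com/Einsteins-Workshop/python-usaco | usaco/bronze_2024_jan_1/possible_solution.py | poll_opinions
-- ===== SOURCE A (Python) =====
-- def poll_opinions(starting_state):
--     if len(starting_state) == 1:
--         return str(starting_state[0])
--     if len(starting_state) == 2:
--         if starting_state[0] == starting_state[1]:
--             return str(starting_state[0])
--         else:
--             return str(-1)
--     possible_winning_hay = set()
--     for i in range(len(starting_state) - 2):
--         if (starting_state[i] == starting_state[i+1]) or (starting_state[i] == starting_state[i+2]):
--             possible_winning_hay.add(starting_state[i])
--     if starting_state[-1] == starting_state[-2]: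
--         possible_winning_hay.add(starting_state[-1])
--     if len(possible_winning_hay) == 0:
--         return str(-1)
--     return " ".join([str(x) for x in sorted(possible_winning_hay)])
-- ===== SOURCE B (Python) =====
-- def poll_opinions(starting_state):
--     # One pass with a dict of last-seen positions; a value can win iff it has
--     # two occurrences at distance <= 2 (a lone element wins trivially).
--     if len(starting_state) == 1:
--         return str(starting_state[0])
--     last_pos = {}
--     candidates = set()
--     for i, v in enumerate(starting_state):
--         if v in last_pos and i - last_pos[v] <= 2:
--             candidates.add(v)
--         last_pos[v] = i
--     if not candidates:
--         return str(-1)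
--     return " ".join(str(x) for x in sorted(candidates))
-- ===== Notes on version B (the rewrite author's own statement) =====
-- stated objective: simpler
-- what changed: A's index-window scan with a special n==2 branch, a forward loop comparing s[i] to s[i+1]/s[i+2], and a separate tail-pair check is replaced by a single enumerate pass that keeps a dict of each value's last-seen position and adds a value when it reappears within distance 2; only the n==1 guard remains.
import Mathlib
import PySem

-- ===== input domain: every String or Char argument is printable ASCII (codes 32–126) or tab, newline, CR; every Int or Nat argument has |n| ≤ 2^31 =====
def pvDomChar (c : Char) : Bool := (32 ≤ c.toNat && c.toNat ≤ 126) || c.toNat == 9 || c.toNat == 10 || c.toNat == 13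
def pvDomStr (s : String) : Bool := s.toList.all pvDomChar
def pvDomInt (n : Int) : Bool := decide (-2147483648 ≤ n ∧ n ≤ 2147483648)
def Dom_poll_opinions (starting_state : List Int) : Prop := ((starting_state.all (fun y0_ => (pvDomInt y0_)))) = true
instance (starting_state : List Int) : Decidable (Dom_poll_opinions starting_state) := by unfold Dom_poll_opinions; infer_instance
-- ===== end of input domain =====

-- B replaces A's index-window scan (special n=2 branch, forward loop to n-3 and a
-- separate tail check) by one enumerate pass with a dict of last-seen positions; objective: simpler.

-- ===== PORT A =====
def poll_opinions (starting_state : List Int) : String :=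
  if starting_state.length = 1 then
    PySem.Int.toStr (PySem.List.pyGetD starting_state 0 0)
  else if starting_state.length = 2 then
    if PySem.List.pyGetD starting_state 0 0 = PySem.List.pyGetD starting_state 1 0 then
      PySem.Int.toStr (PySem.List.pyGetD starting_state 0 0)
    else
      PySem.Int.toStr (-1)
  else
    let hay : PySem.Set Int :=
      (PySem.List.pyRange 0 ((starting_state.length : Int) - 2) 1).foldl
        (fun acc i =>
          if PySem.List.pyGetD starting_state i 0 = PySem.List.pyGetD starting_state (i + 1) 0 ∨
             PySem.List.pyGetD starting_state i 0 = PySem.List.pyGetD starting_state (i + 2) 0 then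
            PySem.Set.add acc (PySem.List.pyGetD starting_state i 0)
          else acc)
        PySem.Set.empty
    let hay : PySem.Set Int :=
      if PySem.List.pyGetD starting_state (-1) 0 = PySem.List.pyGetD starting_state (-2) 0 then
        PySem.Set.add hay (PySem.List.pyGetD starting_state (-1) 0)
      else hay
    if PySem.Set.len hay = 0 then PySem.Int.toStr (-1)
    else PySem.Str.join " " ((PySem.List.sorted hay (fun x => x) false).map PySem.Int.toStr)

-- ===== PORT B =====
-- one loop step of B: consult the last-seen position of v, then record the new one
def pollAltStep (st : PySem.Dict Int Int × PySem.Set Int) (iv : Int × Int) :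
    PySem.Dict Int Int × PySem.Set Int :=
  let cand :=
    match st.1.get? iv.2 with
    | some j => if iv.1 - j ≤ 2 then PySem.Set.add st.2 iv.2 else st.2
    | none => st.2
  (st.1.insert iv.2 iv.1, cand)

def poll_opinions_alt (starting_state : List Int) : String :=
  if starting_state.length = 1 then
    PySem.Int.toStr (PySem.List.pyGetD starting_state 0 0)
  else
    let st := (PySem.List.enumerate starting_state 0).foldl pollAltStep
      (PySem.Dict.empty, PySem.Set.empty)
    if PySem.Set.len st.2 = 0 then PySem.Int.toStr (-1)
    else PySem.Str.join " " ((PySem.List.sorted st.2 (fun x => x) false).map PySem.Int.toStr)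

-- ===== PRECONDITION & SPEC =====
-- Pre_ excludes only the empty list, on which A raises IndexError at starting_state[-1].
def Pre_poll_opinions (starting_state : List Int) : Prop := starting_state ≠ []
instance (starting_state : List Int) : Decidable (Pre_poll_opinions starting_state) := by
  unfold Pre_poll_opinions; infer_instance
def pvWitness_poll_opinions : List Int := [1, 2, 2]

def Spec_poll_opinions (starting_state : List Int) (out : String) : Prop :=
  out = poll_opinions_alt starting_state
instance (starting_state : List Int) (out : String) : Decidable (Spec_poll_opinions starting_state out) := by
  unfold Spec_poll_opinions; infer_instance

-- ===== CLAIM (what is proved, stated in full; the proofs are below) =====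
def Claim_equal_poll_opinions : Prop := ∀ (starting_state : List Int),
  Dom_poll_opinions starting_state → Pre_poll_opinions starting_state →
  Spec_poll_opinions starting_state (poll_opinions starting_state)
-- ===== LEMMAS AND PROOFS =====

theorem pyGetD_neg_one (s : List Int) (h : 1 ≤ s.length) :
    PySem.List.pyGetD s (-1) 0 = s.getD (s.length - 1) 0 := by
  have h0 : ¬ (0:Int) ≤ -1 := by omega
  have h1 : -(s.length:Int) ≤ -1 := by omega
  simp [PySem.List.pyGetD, PySem.List.pyGet?, PySem.List.pyIdx?, List.getD, h0, h1]

theorem pyGetD_neg_two (s : List Int) (h : 2 ≤ s.length) :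
    PySem.List.pyGetD s (-2) 0 = s.getD (s.length - 2) 0 := by
  have h0 : ¬ (0:Int) ≤ -2 := by omega
  have h1 : -(s.length:Int) ≤ -2 := by omega
  simp [PySem.List.pyGetD, PySem.List.pyGet?, PySem.List.pyIdx?, List.getD, h0, h1]

theorem mem_foldl_addif (c : Int → Prop) [DecidablePred c] (f : Int → Int) :
    ∀ (l : List Int) (acc : PySem.Set Int) (x : Int),
    (x ∈ l.foldl (fun a i => if c i then PySem.Set.add a (f i) else a) acc ↔
      x ∈ acc ∨ ∃ i ∈ l, c i ∧ f i = x)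
  | [], acc, x => by simp
  | i :: l, acc, x => by
    simp only [List.foldl_cons, mem_foldl_addif c f l, List.mem_cons]
    by_cases h : c i
    · simp only [if_pos h, PySem.Set.mem_add]
      constructor
      · rintro (( hx | rfl) | ⟨i', hi', hc', rfl⟩)
        · exact Or.inl hx
        · exact Or.inr ⟨i, Or.inl rfl, h, rfl⟩
        · exact Or.inr ⟨i', Or.inr hi', hc', rfl⟩
      · rintro (hx | ⟨i', (rfl | hi'), hc', rfl⟩)
        · exact Or.inl (Or.inl hx)
        · exact Or.inl (Or.inr rfl)
        · exact Or.inr ⟨i', hi', hc', rfl⟩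
    · simp only [if_neg h]
      constructor
      · rintro (hx | ⟨i', hi', hc', rfl⟩)
        · exact Or.inl hx
        · exact Or.inr ⟨i', Or.inr hi', hc', rfl⟩
      · rintro (hx | ⟨i', (rfl | hi'), hc', rfl⟩)
        · exact Or.inl hx
        · exact absurd hc' h
        · exact Or.inr ⟨i', hi', hc', rfl⟩

theorem nodup_foldl_addif (c : Int → Prop) [DecidablePred c] (f : Int → Int) :
    ∀ (l : List Int) (acc : PySem.Set Int), acc.Nodup →
      (l.foldl (fun a i => if c i then PySem.Set.add a (f i) else a) acc).Nodup
  | [], _, h => h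
  | i :: l, acc, h => by
    simp only [List.foldl_cons]
    apply nodup_foldl_addif
    split_ifs with hc
    · exact PySem.Set.nodup_add _ _ h
    · exact h

def lastIdx : List Int → Int → Option Nat
  | [], _ => none
  | a :: p, v =>
    match lastIdx p v with
    | some j => some (j + 1)
    | none => if a = v then some 0 else none

theorem lastIdx_none : ∀ (p : List Int) (v : Int), lastIdx p v = none ↔ v ∉ p
  | [], v => by simp [lastIdx]
  | a :: p, v => by
    simp only [lastIdx, List.mem_cons]
    rcases h : lastIdx p v with _ | j
    · have hp := (lastIdx_none p v).mp h
      by_cases hav : a = v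
      · simp [hav]
      · simp [hav, hp]
        exact fun hv => hav hv.symm
    · have : v ∈ p := by
        by_contra hv
        rw [← lastIdx_none p v] at hv
        simp [hv] at h
      simp [this]

theorem lastIdx_some : ∀ (p : List Int) (v : Int) (j : Nat), lastIdx p v = some j →
    j < p.length ∧ p.getD j 0 = v ∧ ∀ m, j < m → m < p.length → p.getD m 0 ≠ v
  | [], v, j => by simp [lastIdx]
  | a :: p, v, j => by
    simp only [lastIdx]
    rcases h : lastIdx p v with _ | j'
    · have hnv := (lastIdx_none p v).mp h
      by_cases hav : a = v
      · simp only [if_pos hav, Option.some.injEq]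
        intro hj
        subst hj
        refine ⟨by simp, by simpa using hav, ?_⟩
        intro m h0 hm hc
        match m, h0 with
        | m + 1, _ =>
          simp only [List.getD_cons_succ] at hc
          simp only [List.length_cons, Nat.add_lt_add_iff_right] at hm
          rw [List.getD_eq_getElem _ _ hm] at hc
          exact hnv (hc ▸ List.getElem_mem hm)
      · simp [hav]
    · simp only [Option.some.injEq]
      intro hj
      subst hj
      obtain ⟨h1, h2, h3⟩ := lastIdx_some p v j' h
      refine ⟨by simpa using h1, by simpa using h2, ?_⟩
      intro m hm hml
      match m, hm with
      | m + 1, hm =>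
        simp only [List.getD_cons_succ]
        exact h3 m (by omega) (by simpa using hml)

def buildD (p : List Int) (k : Int) (d : PySem.Dict Int Int) : PySem.Dict Int Int :=
  (PySem.List.enumerate p k).foldl (fun d iv => d.insert iv.2 iv.1) d

theorem get?_buildD : ∀ (p : List Int) (k : Int) (d : PySem.Dict Int Int) (v : Int),
    (buildD p k d).get? v =
      match lastIdx p v with
      | some j => some (k + j)
      | none => d.get? v
  | [], k, d, v => by simp [buildD, lastIdx, PySem.List.enumerate]
  | a :: p, k, d, v => by
    simp only [buildD, PySem.List.enumerate_cons, List.foldl_cons, lastIdx]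
    rw [show ((PySem.List.enumerate p (k+1)).foldl (fun d iv => d.insert iv.2 iv.1) (d.insert a k))
        = buildD p (k+1) (d.insert a k) from rfl, get?_buildD p (k+1) (d.insert a k) v]
    rcases h : lastIdx p v with _ | j
    · by_cases hav : v = a
      · subst hav
        simp [PySem.Dict.get?_insert_self]
      · rw [PySem.Dict.get?_insert_of_ne _ _ hav, if_neg (fun (h' : a = v) => hav h'.symm)]
    · simp only []
      congr 1
      omega

theorem nodup_foldl_step : ∀ (l : List (Int × Int)) (st : PySem.Dict Int Int × PySem.Set Int),
    st.2.Nodup → ((l.foldl pollAltStep st).2).Nodup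
  | [], _, h => h
  | iv :: l, st, h => by
    simp only [List.foldl_cons]
    apply nodup_foldl_step
    simp only [pollAltStep]
    rcases st.1.get? iv.2 with _ | j
    · exact h
    · simp only []
      split_ifs with _
      · exact PySem.Set.nodup_add _ _ h
      · exact h

theorem fst_foldl_step : ∀ (l : List (Int × Int)) (st : PySem.Dict Int Int × PySem.Set Int),
    (l.foldl pollAltStep st).1 = l.foldl (fun d iv => d.insert iv.2 iv.1) st.1
  | [], _ => rfl
  | iv :: l, st => by
    simp only [List.foldl_cons, fst_foldl_step l]
    rfl

theorem buildD_append (p : List Int) (r : Int) (d : PySem.Dict Int Int) :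
    buildD (p ++ [r]) 0 d = (buildD p 0 d).insert r (p.length : Int) := by
  simp [buildD, PySem.List.enumerate_append, List.foldl_append, PySem.List.enumerate_cons]

theorem getD_append_left (p q : List Int) (i : Nat) (h : i < p.length) :
    (p ++ q).getD i 0 = p.getD i 0 := by
  rw [List.getD_eq_getElem _ _ (by simp; omega), List.getD_eq_getElem _ _ h,
    List.getElem_append_left h]

theorem getD_append_mid (p : List Int) (r : Int) (q : List Int) :
    (p ++ r :: q).getD p.length 0 = r := by
  rw [List.getD_eq_getElem _ _ (by simp)]
  simp

theorem candB (s : List Int) : ∀ (rest p : List Int) (cand : PySem.Set Int) (x : Int),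
    s = p ++ rest →
    (x ∈ ((PySem.List.enumerate rest (p.length : Int)).foldl pollAltStep
        (buildD p 0 PySem.Dict.empty, cand)).2 ↔
      x ∈ cand ∨ ∃ i j : Nat, i < j ∧ j < s.length ∧ p.length ≤ j ∧ j ≤ i + 2 ∧
        s.getD i 0 = x ∧ s.getD j 0 = x)
  | [], p, cand, x, hs => by
    subst hs
    simp only [PySem.List.enumerate_nil, List.foldl_nil]
    constructor
    · exact Or.inl
    · rintro (h | ⟨i, j, h1, h2, h3, -⟩)
      · exact h
      · simp only [List.append_nil, List.length_append] at h2 h3 ⊢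
        omega
  | r :: rest', p, cand, x, hs => by
    rw [PySem.List.enumerate_cons, List.foldl_cons]
    have hstep : pollAltStep (buildD p 0 PySem.Dict.empty, cand) ((p.length : Int), r) =
        (buildD (p ++ [r]) 0 PySem.Dict.empty,
          (match (buildD p 0 PySem.Dict.empty).get? r with
            | some j => if (p.length : Int) - j ≤ 2 then PySem.Set.add cand r else cand
            | none => cand)) := by
      rw [pollAltStep, buildD_append]
    rw [hstep]
    have hlen : ((p.length : Int) + 1) = (((p ++ [r]).length : Nat) : Int) := by
      simp
    rw [hlen, candB s rest' (p ++ [r]) _ x (by simpa using hs)]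
    rw [get?_buildD, PySem.Dict.get?_empty]
    have hsl : s.length = p.length + 1 + rest'.length := by subst hs; simp; omega
    have hgetmid : s.getD p.length 0 = r := by subst hs; exact getD_append_mid p r rest'
    have hgetl : ∀ i : Nat, i < p.length → s.getD i 0 = p.getD i 0 := by
      intro i hi; subst hs; exact getD_append_left p _ i hi
    simp only [List.length_append, List.length_cons, List.length_nil]
    constructor
    · rintro (hc | ⟨i, j, h1, h2, h3, h4, h5, h6⟩)
      · -- membership in cand'
        rcases hL : lastIdx p r with _ | j0
        · simp only [hL] at hc
          exact Or.inl hc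
        · simp only [hL] at hc
          by_cases hif : (p.length : Int) - (0 + (j0 : Int)) ≤ 2
          · rw [if_pos hif, PySem.Set.mem_add] at hc
            rcases hc with hc | rfl
            · exact Or.inl hc
            · obtain ⟨hj0, hgj0, -⟩ := lastIdx_some p x j0 hL
              exact Or.inr ⟨j0, p.length, hj0, by omega, le_refl _, by omega,
                by rw [hgetl j0 hj0]; exact hgj0, hgetmid⟩
          · rw [if_neg hif] at hc
            exact Or.inl hc
      · exact Or.inr ⟨i, j, h1, by omega, by omega, h4, h5, h6⟩
    · rintro (hc | ⟨i, j, h1, h2, h3, h4, h5, h6⟩)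
      · -- cand ⊆ cand'
        left
        rcases hL : lastIdx p r with _ | j0 <;> simp only [hL]
        · exact hc
        · split_ifs with _
          · exact (PySem.Set.mem_add _ _ _).mpr (Or.inl hc)
          · exact hc
      · by_cases hj : p.length + 1 ≤ j
        · exact Or.inr ⟨i, j, h1, by omega, hj, h4, h5, h6⟩
        · -- j = p.length: the pair ends exactly at the new element
          have hjp : j = p.length := by omega
          subst hjp
          have hxr : x = r := by rw [← h6, hgetmid]
          subst hxr
          have hip : i < p.length := h1
          have hpi : p.getD i 0 = x := by rw [← hgetl i hip]; exact h5
          left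
          rcases hL : lastIdx p x with _ | j0 <;> simp only [hL]
          · exfalso
            have : x ∈ p := by
              rw [← hpi]
              rw [List.getD_eq_getElem _ _ hip]
              exact List.getElem_mem hip
            exact (lastIdx_none p x).mp hL this
          · obtain ⟨hj0, hgj0, hmax⟩ := lastIdx_some p x j0 hL
            have hij0 : i ≤ j0 := by
              by_contra hlt
              exact hmax i (by omega) hip hpi
            rw [if_pos (by omega : (p.length : Int) - (0 + (j0 : Int)) ≤ 2)]
            exact (PySem.Set.mem_add _ _ _).mpr (Or.inr rfl)

def Qp (s : List Int) (x : Int) : Prop :=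
  ∃ i j : Nat, i < j ∧ j < s.length ∧ j ≤ i + 2 ∧ s.getD i 0 = x ∧ s.getD j 0 = x

def Bcand (s : List Int) : PySem.Set Int :=
  ((PySem.List.enumerate s 0).foldl pollAltStep (PySem.Dict.empty, PySem.Set.empty)).2

theorem Bcand_mem (s : List Int) (x : Int) : x ∈ Bcand s ↔ Qp s x := by
  have h := candB s s [] PySem.Set.empty x (by simp)
  unfold Bcand Qp
  simp only [List.length_nil, Nat.cast_zero] at h
  rw [show (buildD ([] : List Int) 0 PySem.Dict.empty) = PySem.Dict.empty from rfl] at h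
  rw [h]
  constructor
  · rintro (hc | ⟨i, j, h1, h2, _, h4, h5, h6⟩)
    · simp [PySem.Set.empty] at hc
    · exact ⟨i, j, h1, h2, h4, h5, h6⟩
  · rintro ⟨i, j, h1, h2, h4, h5, h6⟩
    exact Or.inr ⟨i, j, h1, h2, by omega, h4, h5, h6⟩

theorem Bcand_nodup (s : List Int) : (Bcand s).Nodup :=
  nodup_foldl_step _ _ (by simp [PySem.Set.empty])

def Ahay (s : List Int) : PySem.Set Int :=
  let hay : PySem.Set Int :=
    (PySem.List.pyRange 0 ((s.length : Int) - 2) 1).foldl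
      (fun acc i =>
        if PySem.List.pyGetD s i 0 = PySem.List.pyGetD s (i + 1) 0 ∨
           PySem.List.pyGetD s i 0 = PySem.List.pyGetD s (i + 2) 0 then
          PySem.Set.add acc (PySem.List.pyGetD s i 0)
        else acc)
      PySem.Set.empty
  if PySem.List.pyGetD s (-1) 0 = PySem.List.pyGetD s (-2) 0 then
    PySem.Set.add hay (PySem.List.pyGetD s (-1) 0)
  else hay

theorem Ahay_nodup (s : List Int) : (Ahay s).Nodup := by
  unfold Ahay
  split_ifs with h
  · exact PySem.Set.nodup_add _ _ (nodup_foldl_addif _ _ _ _ (by simp [PySem.Set.empty]))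
  · exact nodup_foldl_addif _ _ _ _ (by simp [PySem.Set.empty])

theorem Ahay_mem (s : List Int) (h3 : 3 ≤ s.length) (x : Int) : x ∈ Ahay s ↔ Qp s x := by
  unfold Ahay
  have hloop := mem_foldl_addif
    (fun i => PySem.List.pyGetD s i 0 = PySem.List.pyGetD s (i + 1) 0 ∨
              PySem.List.pyGetD s i 0 = PySem.List.pyGetD s (i + 2) 0)
    (fun i => PySem.List.pyGetD s i 0)
    (PySem.List.pyRange 0 ((s.length : Int) - 2) 1) PySem.Set.empty x
  have hn1 := pyGetD_neg_one s (by omega)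
  have hn2 := pyGetD_neg_two s (by omega)
  have hmemloop : x ∈ (PySem.List.pyRange 0 ((s.length : Int) - 2) 1).foldl
      (fun acc i =>
        if PySem.List.pyGetD s i 0 = PySem.List.pyGetD s (i + 1) 0 ∨
           PySem.List.pyGetD s i 0 = PySem.List.pyGetD s (i + 2) 0 then
          PySem.Set.add acc (PySem.List.pyGetD s i 0)
        else acc) PySem.Set.empty ↔
      ∃ k : Nat, k + 2 < s.length ∧
        (s.getD k 0 = s.getD (k + 1) 0 ∨ s.getD k 0 = s.getD (k + 2) 0) ∧ s.getD k 0 = x := by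
    rw [hloop]
    constructor
    · rintro (hc | ⟨i, hi, hcond, hfx⟩)
      · simp [PySem.Set.empty] at hc
      · rw [PySem.List.mem_pyRange_one] at hi
        obtain ⟨hi0, hi2⟩ := hi
        refine ⟨i.toNat, by omega, ?_, ?_⟩
        · rw [show i = ((i.toNat : Nat) : Int) by omega,
            show ((i.toNat : Nat) : Int) + 1 = ((i.toNat + 1 : Nat) : Int) by push_cast; ring,
            show ((i.toNat : Nat) : Int) + 2 = ((i.toNat + 2 : Nat) : Int) by push_cast; ring,
            PySem.List.pyGetD_natCast, PySem.List.pyGetD_natCast, PySem.List.pyGetD_natCast]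
            at hcond
          exact hcond
        · rw [show i = ((i.toNat : Nat) : Int) by omega, PySem.List.pyGetD_natCast] at hfx
          exact hfx
    · rintro ⟨k, hk, hcond, hfx⟩
      refine Or.inr ⟨(k : Int), ?_, ?_, ?_⟩
      · rw [PySem.List.mem_pyRange_one]; omega
      · rw [show ((k : Nat) : Int) + 1 = ((k + 1 : Nat) : Int) by push_cast; ring,
          show ((k : Nat) : Int) + 2 = ((k + 2 : Nat) : Int) by push_cast; ring,
          PySem.List.pyGetD_natCast, PySem.List.pyGetD_natCast, PySem.List.pyGetD_natCast]
        exact hcond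
      · rw [PySem.List.pyGetD_natCast]
        exact hfx
  rw [hn1, hn2]
  constructor
  · intro hx
    by_cases htail : s.getD (s.length - 1) 0 = s.getD (s.length - 2) 0
    · rw [if_pos htail, PySem.Set.mem_add] at hx
      rcases hx with hx | rfl
      · obtain ⟨k, hk, hcond, hfx⟩ := hmemloop.mp hx
        rcases hcond with hc | hc
        · exact ⟨k, k + 1, by omega, by omega, by omega, hfx, by rw [← hc]; exact hfx⟩
        · exact ⟨k, k + 2, by omega, by omega, by omega, hfx, by rw [← hc]; exact hfx⟩
      · exact ⟨s.length - 2, s.length - 1, by omega, by omega, by omega, htail.symm, rfl⟩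
    · rw [if_neg htail] at hx
      obtain ⟨k, hk, hcond, hfx⟩ := hmemloop.mp hx
      rcases hcond with hc | hc
      · exact ⟨k, k + 1, by omega, by omega, by omega, hfx, by rw [← hc]; exact hfx⟩
      · exact ⟨k, k + 2, by omega, by omega, by omega, hfx, by rw [← hc]; exact hfx⟩
  · rintro ⟨i, j, h1, h2, h4, h5, h6⟩
    have hset : x ∈ (PySem.List.pyRange 0 ((s.length : Int) - 2) 1).foldl
        (fun acc i =>
          if PySem.List.pyGetD s i 0 = PySem.List.pyGetD s (i + 1) 0 ∨
             PySem.List.pyGetD s i 0 = PySem.List.pyGetD s (i + 2) 0 then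
            PySem.Set.add acc (PySem.List.pyGetD s i 0)
          else acc) PySem.Set.empty ∨
        (s.getD (s.length - 1) 0 = s.getD (s.length - 2) 0 ∧ x = s.getD (s.length - 1) 0) := by
      by_cases hloopcase : i + 2 < s.length
      · left
        rw [hmemloop]
        rcases (by omega : j = i + 1 ∨ j = i + 2) with rfl | rfl
        · exact ⟨i, hloopcase, Or.inl (by rw [h5, h6]), h5⟩
        · exact ⟨i, hloopcase, Or.inr (by rw [h5, h6]), h5⟩
      · right
        have hji : j = i + 1 ∧ i = s.length - 2 := by omega
        obtain ⟨rfl, rfl⟩ := hji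
        constructor
        · rw [show s.length - 2 + 1 = s.length - 1 by omega] at h6
          rw [h6, h5]
        · rw [show s.length - 2 + 1 = s.length - 1 by omega] at h6
          exact h6.symm
    rcases hset with hset | ⟨htail, rfl⟩
    · split_ifs with h
      · exact (PySem.Set.mem_add _ _ _).mpr (Or.inl hset)
      · exact hset
    · rw [if_pos htail]
      exact (PySem.Set.mem_add _ _ _).mpr (Or.inr rfl)

theorem str_join_single (t : String) : PySem.Str.join " " [t] = t := by
  have h := PySem.Str.toList_join " " [t]
  simp only [List.map, PySem.Chars.join_singleton] at h
  exact String.toList_inj.mp h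

theorem sets_output_eq (C D : PySem.Set Int) (hC : C.Nodup) (hD : D.Nodup)
    (hmem : ∀ x, x ∈ C ↔ x ∈ D) :
    (if PySem.Set.len C = 0 then PySem.Int.toStr (-1)
     else PySem.Str.join " " ((PySem.List.sorted C (fun x => x) false).map PySem.Int.toStr)) =
    (if PySem.Set.len D = 0 then PySem.Int.toStr (-1)
     else PySem.Str.join " " ((PySem.List.sorted D (fun x => x) false).map PySem.Int.toStr)) := by
  have hperm : C.Perm D := (List.perm_ext_iff_of_nodup hC hD).mpr hmem
  have hsort := PySem.List.sorted_eq_sorted_of_perm C D (fun x => x) (fun a b h => h) hperm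
  rw [show PySem.Set.len C = C.length from rfl, show PySem.Set.len D = D.length from rfl,
    hperm.length_eq, hsort]

theorem poll_equal_aux (s : List Int) (hne : s ≠ []) : poll_opinions s = poll_opinions_alt s := by
  by_cases h1 : s.length = 1
  · simp only [poll_opinions, poll_opinions_alt, if_pos h1]
  · have halt : poll_opinions_alt s =
        (if PySem.Set.len (Bcand s) = 0 then PySem.Int.toStr (-1)
         else PySem.Str.join " "
           ((PySem.List.sorted (Bcand s) (fun x => x) false).map PySem.Int.toStr)) := by
      simp only [poll_opinions_alt, if_neg h1]
      rfl
    by_cases h2 : s.length = 2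
    · match s, h2 with
      | [a, b], _ =>
        have hA : poll_opinions [a, b] =
            if a = b then PySem.Int.toStr a else PySem.Int.toStr (-1) := by
          simp [poll_opinions, PySem.List.pyGetD, PySem.List.pyGet?, PySem.List.pyIdx?]
        rw [hA, halt]
        by_cases hab : a = b
        · subst hab
          have hB : Bcand [a, a] = [a] := by
            simp only [Bcand, PySem.List.enumerate_cons, PySem.List.enumerate_nil,
              List.foldl_cons, List.foldl_nil, pollAltStep, PySem.Dict.get?_empty,
              PySem.Dict.get?_insert_self]
            norm_num
          rw [hB, if_pos rfl]
          rw [show PySem.List.sorted [a] (fun x => x) = [a] from rfl]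
          simp only [List.map]
          rw [str_join_single]
          rfl
        · have hB : Bcand [a, b] = [] := by
            simp only [Bcand, PySem.List.enumerate_cons, PySem.List.enumerate_nil,
              List.foldl_cons, List.foldl_nil, pollAltStep, PySem.Dict.get?_empty,
              PySem.Dict.get?_insert_of_ne _ _ (fun h => hab h.symm)]
            rfl
          rw [hB, if_neg hab]
          rfl
    · have hlen0 : s.length ≠ 0 := by simpa using hne
      have h3 : 3 ≤ s.length := by omega
      have hA : poll_opinions s =
          (if PySem.Set.len (Ahay s) = 0 then PySem.Int.toStr (-1)
           else PySem.Str.join " "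
             ((PySem.List.sorted (Ahay s) (fun x => x) false).map PySem.Int.toStr)) := by
        simp only [poll_opinions, if_neg h1, if_neg h2]
        rfl
      rw [hA, halt]
      exact sets_output_eq _ _ (Ahay_nodup s) (Bcand_nodup s)
        (fun x => (Ahay_mem s h3 x).trans (Bcand_mem s x).symm)

-- ===== VERDICT (by name: the statement is the Claim_ definition above) =====
theorem poll_opinions_spec : Claim_equal_poll_opinions := by
  intro s _ hpre
  exact poll_equal_aux s hpre
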